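-- pv_equiv track=rewrite | github.com/chrisryda/security-IDATT2503 | ex10/task1.py | task_b
-- ===== SOURCE A (Python) =====
-- def task_b(z_star, n):
--     order_of_elements = []
--     for i in range(len(z_star)):
--         for k in range(1, n):
--             val = z_star[i]**k%n
--             if val == 1 and (n-1)%k == 0:
--                 order_of_elements.append((z_star[i], k))
--                 break
--     return order_of_elements
-- ===== SOURCE B (Python) =====
-- def task_b(z_star, n):
--     # Incremental modular multiplication instead of recomputing big-int powers x**k each step.
--     result = []
--     for x in z_star:
--         acc, k = 1, 0
--         while k + 1 < n:
--             k += 1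
--             acc = acc * x % n
--             if acc == 1 and (n - 1) % k == 0:
--                 result.append((x, k))
--                 break
--     return result
-- ===== Notes on version B (the rewrite author's own statement) =====
-- stated objective: faster
-- what changed: B replaces A's recomputation of the big-int power z**k for every k with a single running accumulator updated by one modular multiplication per step (acc = acc*x % n), so all numbers stay below n.
import Mathlib
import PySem

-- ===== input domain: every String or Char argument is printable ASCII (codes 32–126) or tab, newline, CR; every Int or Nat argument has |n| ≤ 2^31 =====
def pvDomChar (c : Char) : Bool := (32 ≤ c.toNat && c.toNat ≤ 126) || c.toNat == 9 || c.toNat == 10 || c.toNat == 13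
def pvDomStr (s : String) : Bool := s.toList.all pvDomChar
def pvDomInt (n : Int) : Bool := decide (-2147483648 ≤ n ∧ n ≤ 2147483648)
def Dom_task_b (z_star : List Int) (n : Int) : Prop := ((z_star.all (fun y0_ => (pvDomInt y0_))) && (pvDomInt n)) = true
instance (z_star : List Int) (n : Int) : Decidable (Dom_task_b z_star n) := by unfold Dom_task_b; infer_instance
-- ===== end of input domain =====

-- B replaces A's big-int powers z**k with one running accumulator multiplied mod n per step; return value only, no mutation.

-- ===== PORT A =====
-- inner 'for k in range(1, n): … break' as a first-match scan over the remaining k values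
def taskAFind (x n : Int) : List Int → Option Int
  | [] => none
  | k :: ks =>
    let val := PySem.Int.mod (x ^ k.toNat) n
    if val = 1 ∧ PySem.Int.mod (n - 1) k = 0 then some k
    else taskAFind x n ks

def task_b (z_star : List Int) (n : Int) : List (List Int) :=
  (PySem.List.pyRange 0 (PySem.List.len z_star) 1).foldl
    (fun acc i =>
      match taskAFind (PySem.List.pyGetD z_star i 0) n (PySem.List.pyRange 1 n 1) with
      | some k => acc ++ [[PySem.List.pyGetD z_star i 0, k]]
      | none => acc) []

-- ===== PORT B =====
-- 'while k + 1 < n' loop with fuel = n.toNat (enough for at most n - 1 iterations)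
def taskBFind (x n : Int) : Nat → Int → Int → Option Int
  | 0, _, _ => none
  | fuel + 1, acc, k =>
    if k + 1 < n then
      let acc' := PySem.Int.mod (acc * x) n
      if acc' = 1 ∧ PySem.Int.mod (n - 1) (k + 1) = 0 then some (k + 1)
      else taskBFind x n fuel acc' (k + 1)
    else none

def task_b_alt (z_star : List Int) (n : Int) : List (List Int) :=
  z_star.foldl
    (fun res x =>
      match taskBFind x n n.toNat 1 0 with
      | some k => res ++ [[x, k]]
      | none => res) []

-- ===== PRECONDITION & SPEC =====
def Spec_task_b (z_star : List Int) (n : Int) (out : List (List Int)) : Prop := out = task_b_alt z_star n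
instance (z_star : List Int) (n : Int) (out : List (List Int)) : Decidable (Spec_task_b z_star n out) := by unfold Spec_task_b; infer_instance

-- ===== CLAIM (what is proved, stated in full; the proofs are below) =====
def Claim_equal_task_b : Prop := ∀ (z_star : List Int) (n : Int), Dom_task_b z_star n → Spec_task_b z_star n (task_b z_star n)

-- ===== LEMMAS AND PROOFS =====

-- running-accumulator invariant: entering B's loop with acc = x^j mod n at counter j
-- scans the same k-values with the same test as A's scan of range(j+1, n)
lemma find_eq (x n : Int) (hn : 1 < n) :
    ∀ (fuel : Nat) (j : Int), 0 ≤ j → n ≤ j + 1 + fuel →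
      taskBFind x n fuel (PySem.Int.mod (x ^ j.toNat) n) j
        = taskAFind x n (PySem.List.pyRange (j + 1) n 1) := by
  intro fuel
  induction fuel with
  | zero =>
    intro j hj hb
    rw [PySem.List.pyRange_one_eq_nil (by omega)]
    rfl
  | succ m ih =>
    intro j hj hb
    by_cases hlt : j + 1 < n
    · rw [PySem.List.pyRange_one_cons hlt]
      have hstep : PySem.Int.mod (PySem.Int.mod (x ^ j.toNat) n * x) n
          = PySem.Int.mod (x ^ (j + 1).toNat) n := by
        have htn : (j + 1).toNat = j.toNat + 1 := by omega
        rw [PySem.Int.mod_eq_emod_of_pos (by omega), PySem.Int.mod_eq_emod_of_pos (by omega),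
          PySem.Int.mod_eq_emod_of_pos (by omega), htn, pow_succ]
        conv_rhs => rw [Int.mul_emod]
        rw [Int.mul_emod (x ^ j.toNat % n) x n, Int.emod_emod_of_dvd _ dvd_rfl]
      simp only [taskBFind, taskAFind, if_pos hlt, hstep]
      split
      · rfl
      · exact ih (j + 1) (by omega) (by omega)
    · rw [PySem.List.pyRange_one_eq_nil (by omega)]
      simp only [taskBFind, taskAFind, if_neg hlt]

lemma find_eq_top (x n : Int) :
    taskBFind x n n.toNat 1 0 = taskAFind x n (PySem.List.pyRange 1 n 1) := by
  by_cases hn : 1 < n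
  · have h1 : PySem.Int.mod ((x : Int) ^ (0 : Int).toNat) n = 1 := by
      have hx : (x : Int) ^ (0 : Int).toNat = 1 := by norm_num
      rw [PySem.Int.mod_eq_emod_of_pos (by omega), hx]
      exact Int.emod_eq_of_lt (by norm_num) hn
    have := find_eq x n hn n.toNat 0 le_rfl (by omega)
    rw [h1] at this
    simpa using this
  · rw [PySem.List.pyRange_one_eq_nil (by omega)]
    cases h : n.toNat with
    | zero => rfl
    | succ m =>
      simp only [taskAFind, taskBFind]
      rw [if_neg (by omega)]

-- ===== VERDICT (by name: the statement is the Claim_ definition above) =====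
theorem task_b_spec : Claim_equal_task_b := by
  intro z_star n _
  unfold Spec_task_b task_b task_b_alt
  rw [show (PySem.List.len z_star) = ((z_star.length : Int)) from PySem.List.len_eq z_star]
  rw [PySem.List.foldl_pyRange_zero_pyGetD' z_star 0
    (fun res x =>
      match taskAFind x n (PySem.List.pyRange 1 n 1) with
      | some k => res ++ [[x, k]]
      | none => res) []]
  congr 1
  funext res x
  rw [find_eq_top x n]
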